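-- pv_equiv track=rewrite | github.com/gabesargeant/maptodata | views.py | table_names_builder
-- ===== SOURCE A (Python) =====
-- def table_names_builder(names):
--     """
--     Lints the columns to ensure they are comprised of only the characters that
--     make valid mysql headers. This prevents againts injection, Had to do this
--     as there is a current bug with the mysql connector that does not allow for
--     parameterization of columns or tables. Probs will switch to a diff DB,
--     maybe! But I have spent enough time building the current thingo.
--     """
--     tables = " {} "
--     i = 1
--     while i < len(names):
--         tables = tables + " NATURAL JOIN {}"
--         i = i + 1
--
--     tables = tables.format(*names)
--     tables = tables.replace('\'', '')
--     tables = tables.replace('[', '')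
--     tables = tables.replace(']', '')
--     tables = tables.replace('(', '')
--     tables = tables.replace(')', '')
--     tables = tables.replace(',', '')
--
--     return tables
-- ===== SOURCE B (Python) =====
-- def table_names_builder(names):
--     def clean(s):
--         return ''.join(c for c in s if c not in "'[](),")
--     pieces = [" " + clean(names[0]) + " "]
--     pieces.extend(" NATURAL JOIN " + clean(n) for n in names[1:])
--     return "".join(pieces)
-- ===== Notes on version B (the rewrite author's own statement) =====
-- stated objective: faster
-- what changed: B drops the '{}'-placeholder template, the quadratic repeated string concatenation and the str.format pass: it builds the pieces directly from the names and strips the forbidden characters per name with one filter, joining once, instead of six whole-string replace passes.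
import Mathlib
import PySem

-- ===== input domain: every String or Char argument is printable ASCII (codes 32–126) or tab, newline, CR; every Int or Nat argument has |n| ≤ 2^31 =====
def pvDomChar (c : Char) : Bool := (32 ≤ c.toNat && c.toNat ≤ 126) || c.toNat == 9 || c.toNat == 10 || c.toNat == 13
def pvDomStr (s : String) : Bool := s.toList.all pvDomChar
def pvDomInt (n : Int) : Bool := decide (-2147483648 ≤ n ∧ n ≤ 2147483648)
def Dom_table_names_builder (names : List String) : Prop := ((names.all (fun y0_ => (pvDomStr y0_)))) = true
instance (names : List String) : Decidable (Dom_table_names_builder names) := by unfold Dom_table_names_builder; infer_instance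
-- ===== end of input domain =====

-- B replaces A's '{}'-placeholder template (built by quadratic repeated concatenation) +
-- str.format + six whole-string replace passes by building the pieces directly from the
-- names, stripping forbidden chars per name with one filter and joining once (measured faster).

-- ===== PORT A =====
-- the while-loop: while i < len(names): tables += " NATURAL JOIN {}"
def tnbLoopA (names : List String) (i : Nat) (tables : List Char) : List Char :=
  if _h : i < names.length then
    tnbLoopA names (i + 1) (tables ++ " NATURAL JOIN {}".toList)
  else tables
termination_by names.length - i

-- hand port of str.format(*args): exact for templates whose only braces are the
-- '{}' placeholders and that have no more placeholders than arguments — which is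
-- exactly the template A builds under Pre_ (names ≠ []).
def tnbFormat : List Char → List (List Char) → List Char
  | '{' :: '}' :: rest, a :: as => a ++ tnbFormat rest as
  | c :: rest, as => c :: tnbFormat rest as
  | [], _ => []

def table_names_builder (names : List String) : String :=
  let tables := " {} ".toList
  let tables := tnbLoopA names 1 tables
  let tables := tnbFormat tables (names.map String.toList)
  let tables := PySem.Chars.replace tables "'".toList "".toList
  let tables := PySem.Chars.replace tables "[".toList "".toList
  let tables := PySem.Chars.replace tables "]".toList "".toList
  let tables := PySem.Chars.replace tables "(".toList "".toList
  let tables := PySem.Chars.replace tables ")".toList "".toList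
  let tables := PySem.Chars.replace tables ",".toList "".toList
  String.mk tables

-- ===== PORT B =====
-- ''.join(c for c in s if c not in "'[](),")
def tnbClean (s : List Char) : List Char :=
  s.filter (fun c => !("'[](),".toList.contains c))

def table_names_builder_alt (names : List String) : String :=
  let cs := names.map String.toList
  -- names[0]: IndexError on [] is outside Pre_; pyGetD is the total form
  let first := PySem.List.pyGetD cs 0 []
  let pieces := (" ".toList ++ tnbClean first ++ " ".toList) ::
    (PySem.List.slice cs (some 1) none).map (fun n => " NATURAL JOIN ".toList ++ tnbClean n)
  String.mk pieces.flatten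

-- ===== PRECONDITION & SPEC =====
-- Pre_ excludes only names = [], where both A ("{} ".format()) and B (names[0]) raise IndexError.
def Pre_table_names_builder (names : List String) : Prop := names ≠ []
instance (names : List String) : Decidable (Pre_table_names_builder names) := by unfold Pre_table_names_builder; infer_instance
def pvWitness_table_names_builder : List String := ["users", "orders"]

def Spec_table_names_builder (names : List String) (out : String) : Prop := out = table_names_builder_alt names
instance (names : List String) (out : String) : Decidable (Spec_table_names_builder names out) := by unfold Spec_table_names_builder; infer_instance

-- ===== CLAIM (what is proved, stated in full; the proofs are below) =====
def Claim_equal_table_names_builder : Prop := ∀ (names : List String), Dom_table_names_builder names → Pre_table_names_builder names → Spec_table_names_builder names (table_names_builder names)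

-- ===== LEMMAS AND PROOFS =====

-- the loop appends (len - i) copies of the join template
theorem tnbLoopA_eq (names : List String) :
    ∀ (k i : Nat) (t : List Char), names.length - i = k →
      tnbLoopA names i t = t ++ (List.replicate k (" NATURAL JOIN {}".toList)).flatten := by
  intro k
  induction k with
  | zero =>
    intro i t hk
    unfold tnbLoopA
    rw [dif_neg (by omega)]
    simp
  | succ k ih =>
    intro i t hk
    unfold tnbLoopA
    rw [dif_pos (by omega)]
    rw [ih (i + 1) _ (by omega)]
    simp [List.replicate_succ]

theorem tnbFormat_cons_of_ne (c : Char) (rest : List Char) (as : List (List Char))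
    (h : c ≠ '{') : tnbFormat (c :: rest) as = c :: tnbFormat rest as := by
  rw [tnbFormat.eq_def]
  split
  · rename_i heq1 heq2
    exact absurd (by injection heq2) h
  · rename_i heq _
    injection heq with h1 h2
    rw [h1, h2]
  · rename_i heq
    exact absurd heq (by simp)

theorem tnbFormat_prefix (T : List Char) (as : List (List Char)) :
    ∀ (p : List Char), '{' ∉ p → tnbFormat (p ++ T) as = p ++ tnbFormat T as := by
  intro p
  induction p with
  | nil => intro _; rfl
  | cons c p ih =>
    intro hmem
    simp only [List.mem_cons, not_or] at hmem
    rw [List.cons_append, tnbFormat_cons_of_ne c _ as (fun hc => hmem.1 hc.symm),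
        ih hmem.2, List.cons_append]

theorem tnbFormat_rep :
    ∀ (as : List (List Char)),
      tnbFormat ((List.replicate as.length (" NATURAL JOIN {}".toList)).flatten) as
        = (as.map (fun a => " NATURAL JOIN ".toList ++ a)).flatten := by
  intro as
  induction as with
  | nil => simp [tnbFormat]
  | cons a as ih =>
    simp only [List.length_cons, List.replicate_succ, List.flatten_cons, List.map_cons]
    have hJ : " NATURAL JOIN {}".toList
        = " NATURAL JOIN ".toList ++ ('{' :: '}' :: []) := rfl
    rw [hJ, List.append_assoc,
        tnbFormat_prefix _ _ (" NATURAL JOIN ".toList) (by decide)]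
    simp only [List.cons_append, List.nil_append]
    rw [show tnbFormat ('{' :: '}' :: (List.replicate as.length (" NATURAL JOIN ".toList ++ ('{' :: '}' :: []))).flatten) (a :: as)
          = a ++ tnbFormat ((List.replicate as.length (" NATURAL JOIN ".toList ++ ('{' :: '}' :: []))).flatten) as from rfl]
    rw [show (" NATURAL JOIN ".toList ++ ('{' :: '}' :: [])) = " NATURAL JOIN {}".toList from rfl, ih]
    simp

theorem tnbFormat_head (a : List Char) (as : List (List Char)) (T : List Char) :
    tnbFormat (" {} ".toList ++ T) (a :: as) = ' ' :: (a ++ ' ' :: tnbFormat T as) := by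
  have h4 : " {} ".toList = [' '] ++ ('{' :: '}' :: [' ']) := rfl
  rw [h4, List.append_assoc, tnbFormat_prefix _ _ [' '] (by decide)]
  simp only [List.cons_append, List.nil_append]
  rw [show tnbFormat ('{' :: '}' :: ' ' :: T) (a :: as)
        = a ++ tnbFormat (' ' :: T) as from rfl,
      show (' ' :: T) = [' '] ++ T from rfl,
      tnbFormat_prefix _ _ [' '] (by decide)]
  simp

-- single-char deletion replace is a filter
theorem tnbReplaceGo_filter (c : Char) :
    ∀ (l : List Char) (fuel : Nat) (acc : List Char), l.length ≤ fuel →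
      PySem.Chars.replace.go [c] [] fuel l acc = acc.reverse ++ l.filter (fun a => a != c) := by
  intro l
  induction l with
  | nil =>
    intro fuel acc _
    cases fuel <;> simp [PySem.Chars.replace.go]
  | cons h t ih =>
    intro fuel acc hle
    cases fuel with
    | zero => simp at hle
    | succ f =>
      rw [PySem.Chars.replace.go]
      by_cases hc : c = h
      · subst hc
        rw [if_pos (by simp [List.isPrefixOf])]
        simp only [List.length_cons, List.length_nil, Nat.zero_add, List.drop_succ_cons,
          List.drop_zero, List.reverse_nil, List.nil_append]
        rw [ih f _ (by simpa using hle)]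
        simp
      · rw [if_neg (by simp [List.isPrefixOf]; exact fun hh => hc hh)]
        rw [ih f _ (by simpa using hle)]
        simp [bne, Ne.symm hc]

theorem tnbReplace_filter (c : Char) (s : List Char) :
    PySem.Chars.replace s [c] [] = s.filter (fun a => a != c) := by
  rw [PySem.Chars.replace]
  rw [if_neg (by simp)]
  rw [tnbReplaceGo_filter c s s.length [] (le_refl _)]
  simp

-- the six filters collapse to tnbClean
theorem tnbChain_eq_clean (s : List Char) :
    (((((s.filter (fun a => a != '\'')).filter (fun a => a != '[')).filter
        (fun a => a != ']')).filter (fun a => a != '(')).filter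
        (fun a => a != ')')).filter (fun a => a != ',') = tnbClean s := by
  unfold tnbClean
  simp only [List.filter_filter]
  apply List.filter_congr
  intro a _
  simp only [show "'[](),".toList = ['\'', '[', ']', '(', ')', ','] from rfl,
    List.contains_cons, List.contains_nil, Bool.or_false, Bool.not_or, bne]
  cases ha1 : a == '\'' <;> cases ha2 : a == '[' <;> cases ha3 : a == ']' <;>
    cases ha4 : a == '(' <;> cases ha5 : a == ')' <;> cases ha6 : a == ',' <;> simp [*]

theorem tnbClean_append (s t : List Char) :
    tnbClean (s ++ t) = tnbClean s ++ tnbClean t := by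
  unfold tnbClean; simp

theorem tnbClean_flatten (cs : List (List Char)) :
    tnbClean ((cs.map (fun a => " NATURAL JOIN ".toList ++ a)).flatten)
      = (cs.map (fun n => " NATURAL JOIN ".toList ++ tnbClean n)).flatten := by
  induction cs with
  | nil => rfl
  | cons c cs ih =>
    simp only [List.map_cons, List.flatten_cons, tnbClean_append, ih]
    rw [show tnbClean (" NATURAL JOIN ".toList) = " NATURAL JOIN ".toList from by decide]

-- ===== VERDICT (by name: the statement is the Claim_ definition above) =====
theorem table_names_builder_spec : Claim_equal_table_names_builder := by
  intro names _hdom hpre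
  unfold Spec_table_names_builder
  obtain ⟨n0, rest, rfl⟩ : ∃ n0 rest, names = n0 :: rest := by
    cases names with
    | nil => exact absurd rfl hpre
    | cons a l => exact ⟨a, l, rfl⟩
  unfold table_names_builder table_names_builder_alt
  simp only []
  rw [tnbLoopA_eq (n0 :: rest) rest.length 1 _ (by simp)]
  have hrep : rest.length = (rest.map String.toList).length := by simp
  rw [hrep, List.map_cons, tnbFormat_head, tnbFormat_rep]
  rw [show "'".toList = ['\''] from rfl, show "[".toList = ['['] from rfl,
      show "]".toList = [']'] from rfl, show "(".toList = ['('] from rfl,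
      show ")".toList = [')'] from rfl, show ",".toList = [','] from rfl,
      show "".toList = ([] : List Char) from rfl]
  rw [tnbReplace_filter, tnbReplace_filter, tnbReplace_filter, tnbReplace_filter,
      tnbReplace_filter, tnbReplace_filter, tnbChain_eq_clean]
  congr 1
  rw [PySem.List.slice_from_one]
  rw [show PySem.List.pyGetD (n0.toList :: List.map String.toList rest) 0 [] = n0.toList by simp [pysem]]
  rw [show (' ' :: (n0.toList ++ ' ' :: ((rest.map String.toList).map
        (fun a => " NATURAL JOIN ".toList ++ a)).flatten))
      = (([' '] ++ n0.toList) ++ [' ']) ++ ((rest.map String.toList).map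
        (fun a => " NATURAL JOIN ".toList ++ a)).flatten by simp]
  rw [tnbClean_append, tnbClean_append, tnbClean_append, tnbClean_flatten]
  simp only [List.tail_cons, List.flatten_cons]
  rw [show tnbClean [' '] = [' '] from rfl, show " ".toList = [' '] from rfl]
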